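-- pv_equiv track=rewrite | github.com/park-sy/1day_1git | BOJ/19. queue&dequeue/lev6 회전하는큐.py | locl
-- ===== SOURCE A (Python) =====
-- def locl(arr, loc, n):
--     cnt = 0
--     while True:
--         if arr[loc] == n:
--             return cnt, loc
--         cnt += 1
--         loc -= 1
--         if loc < 0:
--             loc = len(arr) -1
-- ===== SOURCE B (Python) =====
-- def locl(arr, loc, n):
--     L = len(arr)
--     best = None
--     for i, v in enumerate(arr):
--         if v == n:
--             d = (loc - i) % L
--             if best is None or d < best[0]:
--                 best = (d, i)
--     return best
-- ===== Notes on version B (the rewrite author's own statement) =====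
-- stated objective: alternative
-- what changed: Replaces A's decrement-with-wraparound probe loop by a single scan over all indices keeping the match with minimal modular distance (loc-i) % len(arr).
-- outside the precondition, e.g. on locl([1, 2], -1, 1): A returns (2, 0), B returns (1, 0); on locl([1, 2], 2, 1): A raises IndexError, B returns (0, 0); on locl([1, 2], 0, 3): A does not finish within the time limit, B returns None
import Mathlib
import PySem

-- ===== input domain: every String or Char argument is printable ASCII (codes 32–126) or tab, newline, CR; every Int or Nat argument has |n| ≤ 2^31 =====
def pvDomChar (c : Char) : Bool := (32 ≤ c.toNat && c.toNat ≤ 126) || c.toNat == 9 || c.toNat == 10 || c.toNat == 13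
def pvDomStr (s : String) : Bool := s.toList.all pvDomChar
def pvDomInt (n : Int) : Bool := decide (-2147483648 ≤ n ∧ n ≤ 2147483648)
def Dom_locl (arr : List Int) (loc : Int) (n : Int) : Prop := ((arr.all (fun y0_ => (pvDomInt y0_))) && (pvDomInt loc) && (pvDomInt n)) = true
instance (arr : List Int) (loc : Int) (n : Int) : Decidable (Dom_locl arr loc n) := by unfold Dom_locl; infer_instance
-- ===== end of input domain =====

-- B replaces A's decrement-with-wraparound probe loop by a single scan keeping the
-- match with minimal modular distance (loc - i) % len(arr); alternative decomposition, same cost.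


-- ===== PORT A =====
-- A's 'while True' walk; the fuel (2*len+2) only makes the recursion total — inside
-- Pre_locl A hits the match in < len steps, so the guard value (0,0) is never reached.
def loclGo (arr : List Int) (n : Int) : Nat → Int → Int → Int × Int
  | 0, _, _ => (0, 0)
  | fuel+1, cnt, loc =>
    if PySem.List.pyGet? arr loc = some n then (cnt, loc)
    else
      let loc' := loc - 1
      loclGo arr n fuel (cnt + 1) (if loc' < 0 then (arr.length : Int) - 1 else loc')

def locl (arr : List Int) (loc : Int) (n : Int) : Int × Int :=
  loclGo arr n (2 * arr.length + 2) 0 loc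

-- ===== PORT B =====
-- transliteration of Source B: one pass over enumerate(arr), keep (d, i) with minimal d.
-- Python returns None when no index matches; that case is outside Pre_locl (guard value (0,0)).
def locl_alt (arr : List Int) (loc : Int) (n : Int) : Int × Int :=
  let L : Int := (arr.length : Int)
  let best := (PySem.List.enumerate arr).foldl
    (fun best p =>
      if p.2 = n then
        let d := PySem.Int.mod (loc - p.1) L
        match best with
        | none => some (d, p.1)
        | some b => if d < b.1 then some (d, p.1) else some b
      else best) none
  best.getD (0, 0)

-- ===== PRECONDITION & SPEC =====
-- Pre_ restricts to the rotation problem's natural domain: loc outside [0, len(arr))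
-- is excluded (A raises IndexError for |loc| ≥ len, and for negative loc A returns via
-- accidental negative-index wraparound), and n must occur in arr (otherwise A loops forever).
def Pre_locl (arr : List Int) (loc : Int) (n : Int) : Prop :=
  0 ≤ loc ∧ loc < (arr.length : Int) ∧ n ∈ arr
instance (arr : List Int) (loc : Int) (n : Int) : Decidable (Pre_locl arr loc n) := by
  unfold Pre_locl; infer_instance

def pvWitness_locl : List Int × Int × Int := ([3, 7, 5], 1, 5)

def Spec_locl (arr : List Int) (loc : Int) (n : Int) (out : Int × Int) : Prop := out = locl_alt arr loc n
instance (arr : List Int) (loc : Int) (n : Int) (out : Int × Int) : Decidable (Spec_locl arr loc n out) := by unfold Spec_locl; infer_instance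

-- ===== CLAIM (what is proved, stated in full; the proofs are below) =====
def Claim_equal_locl : Prop := ∀ (arr : List Int) (loc : Int) (n : Int), Dom_locl arr loc n → Pre_locl arr loc n → Spec_locl arr loc n (locl arr loc n)

-- ===== LEMMAS AND PROOFS =====

-- one wraparound step of A's walk, as a Nat-position function
def nextPos (m j : Nat) : Nat := if j = 0 then m - 1 else j - 1

def walk (m j0 : Nat) : Nat → Nat
  | 0 => j0
  | d + 1 => nextPos m (walk m j0 d)

theorem walk_lt (m j0 : Nat) (hm : 0 < m) (hj : j0 < m) : ∀ d, walk m j0 d < m := by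
  intro d
  induction d with
  | zero => exact hj
  | succ d ih => simp only [walk, nextPos]; split <;> omega

theorem walk_shift (m j0 : Nat) : ∀ d, walk m j0 (d + 1) = walk m (nextPos m j0) d := by
  intro d
  induction d with
  | zero => rfl
  | succ d ih => simp only [walk] at ih ⊢; rw [ih]

theorem walk_int (m j0 : Nat) (hm : 0 < m) (hj : j0 < m) :
    ∀ d, ((walk m j0 d : Nat) : Int) = ((j0 : Int) - d) % (m : Int) := by
  intro d
  induction d with
  | zero =>
    simp only [walk, Nat.cast_zero, sub_zero]
    rw [Int.emod_eq_of_lt (by omega) (by exact_mod_cast hj)]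
  | succ d ih =>
    have hw := walk_lt m j0 hm hj d
    simp only [walk, nextPos]
    have hww : ((walk m j0 d : Nat) : Int) % (m : Int) = ((walk m j0 d : Nat) : Int) :=
      Int.emod_eq_of_lt (by omega) (by exact_mod_cast hw)
    have hstep : ((j0 : Int) - (d + 1 : Nat)) % (m : Int) = ((walk m j0 d : Int) - 1) % (m : Int) := by
      push_cast
      rw [show (j0 : Int) - ((d : Int) + 1) = ((j0 : Int) - d) - 1 from by ring]
      rw [Int.sub_emod ((j0 : Int) - (d : Int)) 1, ← ih]
      conv_rhs => rw [Int.sub_emod]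
      rw [hww]
    rw [hstep]
    split
    · rename_i h0
      rw [h0]
      rw [show ((0 : Nat) : Int) - 1 = -1 from by norm_num]
      have : (-1 : Int) % (m : Int) = (m : Int) - 1 := by
        conv_lhs => rw [show (-1 : Int) = ((m : Int) - 1) + (m : Int) * (-1) from by ring]
        rw [Int.add_mul_emod_self_left]
        exact Int.emod_eq_of_lt (by omega) (by omega)
      rw [this]; omega
    · rename_i h0
      have hw1 : 0 < walk m j0 d := Nat.pos_of_ne_zero h0
      rw [Int.emod_eq_of_lt (by omega) (by omega)]
      omega

-- the A-side loop returns (c + d, walk j d) where d is the least hit distance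
theorem loclGo_spec (arr : List Int) (n : Int) :
    ∀ (d : Nat) (fuel : Nat) (c : Int) (j : Nat),
      j < arr.length → d < fuel →
      arr[walk arr.length j d]? = some n →
      (∀ e, e < d → arr[walk arr.length j e]? ≠ some n) →
      loclGo arr n fuel c (j : Int) = (c + (d : Int), ((walk arr.length j d : Nat) : Int)) := by
  intro d
  induction d with
  | zero =>
    intro fuel c j hj hfuel hhit _
    cases fuel with
    | zero => omega
    | succ f =>
      simp only [loclGo]
      rw [PySem.List.pyGet?_natCast]
      simp only [walk] at hhit
      rw [if_pos hhit]
      simp [walk]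
  | succ d ih =>
    intro fuel c j hj hfuel hhit hleast
    cases fuel with
    | zero => omega
    | succ f =>
      have hmiss : arr[j]? ≠ some n := by
        have := hleast 0 (by omega); simpa [walk] using this
      simp only [loclGo]
      rw [PySem.List.pyGet?_natCast, if_neg hmiss]
      have hm : 0 < arr.length := by omega
      have hcast : (if (j : Int) - 1 < 0 then (arr.length : Int) - 1 else (j : Int) - 1)
          = ((nextPos arr.length j : Nat) : Int) := by
        unfold nextPos
        by_cases h0 : j = 0
        · subst h0; rw [if_pos (by norm_num), if_pos rfl]; omega
        · rw [if_neg (by omega), if_neg h0]; omega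
      rw [hcast]
      have hnj : nextPos arr.length j < arr.length := by unfold nextPos; split <;> omega
      have := ih f (c + 1) (nextPos arr.length j) hnj (by omega)
        (by rw [← walk_shift]; exact hhit)
        (by intro e he; rw [← walk_shift]; exact hleast (e + 1) (by omega))
      rw [this, ← walk_shift]
      simp only [Prod.mk.injEq]
      exact ⟨by push_cast; ring, trivial⟩

-- B-side: the fold is a minimum-selection over the candidate list
def min1 (b : Option (Int × Int)) (c : Int × Int) : Option (Int × Int) :=
  match b with
  | none => some c
  | some b => if c.1 < b.1 then some c else some b

theorem fold_eq_min1 (loc n L : Int) :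
    ∀ (l : List (Int × Int)) (b : Option (Int × Int)),
      l.foldl (fun best p =>
        if p.2 = n then
          let d := PySem.Int.mod (loc - p.1) L
          match best with
          | none => some (d, p.1)
          | some b => if d < b.1 then some (d, p.1) else some b
        else best) b
      = (l.filterMap (fun p => if p.2 = n then some (PySem.Int.mod (loc - p.1) L, p.1) else none)).foldl min1 b := by
  intro l
  induction l with
  | nil => intro b; rfl
  | cons p t ih =>
    intro b
    simp only [List.foldl_cons, List.filterMap_cons]
    by_cases hp : p.2 = n
    · rw [if_pos hp, if_pos hp]
      simp only [List.foldl_cons]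
      rw [ih]
      cases b <;> rfl
    · rw [if_neg hp, if_neg hp]
      exact ih b

theorem min1_fold_unique :
    ∀ (l : List (Int × Int)) (b x : Int × Int),
      (x = b ∨ x ∈ l) →
      (∀ y, (y = b ∨ y ∈ l) → x.1 < y.1 ∨ y = x) →
      l.foldl min1 (some b) = some x := by
  intro l
  induction l with
  | nil =>
    intro b x hx _
    rcases hx with rfl | h
    · rfl
    · simp at h
  | cons h t ih =>
    intro b x hx hmin
    simp only [List.foldl_cons]
    have hb' : min1 (some b) h = some (if h.1 < b.1 then h else b) := by
      simp only [min1]; split_ifs <;> rfl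
    rw [hb']
    apply ih
    · rcases hx with rfl | hx
      · rcases hmin h (Or.inr (List.mem_cons_self ..)) with hlt | heq2
        · left; rw [if_neg (lt_asymm hlt)]
        · left; rw [heq2]; split <;> rfl
      · rcases List.mem_cons.mp hx with rfl | hxt
        · left
          rcases hmin b (Or.inl rfl) with hlt | heq2
          · rw [if_pos hlt]
          · rw [heq2]; split <;> rfl
        · right; exact hxt
    · intro y hy
      apply hmin
      rcases hy with rfl | hy
      · by_cases hc : h.1 < b.1
        · rw [if_pos hc]; right; exact List.mem_cons_self ..
        · rw [if_neg hc]; left; rfl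
      · right; exact List.mem_cons.mpr (Or.inr hy)

theorem min1_fold_none (l : List (Int × Int)) (x : Int × Int) (hx : x ∈ l)
    (hmin : ∀ y ∈ l, x.1 < y.1 ∨ y = x) : l.foldl min1 none = some x := by
  cases l with
  | nil => simp at hx
  | cons h t =>
    simp only [List.foldl_cons]
    show t.foldl min1 (some h) = some x
    apply min1_fold_unique
    · rcases List.mem_cons.mp hx with rfl | hxt
      · exact Or.inl rfl
      · exact Or.inr hxt
    · intro y hy
      apply hmin
      rcases hy with rfl | hy
      · exact List.mem_cons_self ..
      · exact List.mem_cons.mpr (Or.inr hy)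

-- (a - (a - b) % m) % m = b % m : the wraparound cancellation used on both sides
theorem emod_sub_emod (a b m : Int) : (a - (a - b) % m) % m = b % m := by
  rw [Int.sub_emod a ((a - b) % m), Int.emod_emod_of_dvd _ (dvd_refl _), ← Int.sub_emod,
    show a - (a - b) = b from by ring]

theorem walk_hits (m j0 i : Nat) (hm : 0 < m) (hj : j0 < m) (hi : i < m) :
    walk m j0 ((((j0 : Int) - i) % (m : Int)).toNat) = i := by
  have hd0 : 0 ≤ ((j0 : Int) - i) % (m : Int) := Int.emod_nonneg _ (by omega)
  have hdlt : ((j0 : Int) - i) % (m : Int) < (m : Int) := Int.emod_lt_of_pos _ (by omega)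
  have hcast : (((((j0 : Int) - i) % (m : Int)).toNat : Nat) : Int) = ((j0 : Int) - i) % (m : Int) :=
    Int.toNat_of_nonneg hd0
  have hwi := walk_int m j0 hm hj ((((j0 : Int) - i) % (m : Int)).toNat)
  rw [hcast] at hwi
  have h2 : ((j0 : Int) - ((j0 : Int) - i) % (m : Int)) % (m : Int) = (i : Int) := by
    rw [emod_sub_emod]
    exact Int.emod_eq_of_lt (by omega) (by exact_mod_cast hi)
  rw [h2] at hwi
  exact_mod_cast hwi

-- ===== VERDICT (by name: the statement is the Claim_ definition above) =====
theorem locl_spec : Claim_equal_locl := by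
  intro arr loc n _ hpre
  obtain ⟨hloc0, hlocm, hn⟩ := hpre
  unfold Spec_locl
  have hm : 0 < arr.length := by
    rcases arr with _ | ⟨a, t⟩
    · simp at hn
    · simp
  have hloc_cast : ((loc.toNat : Nat) : Int) = loc := Int.toNat_of_nonneg hloc0
  have hj0m : loc.toNat < arr.length := by omega
  obtain ⟨i, hi, hai⟩ := List.mem_iff_getElem.mp hn
  have hex : ∃ d, arr[walk arr.length loc.toNat d]? = some n := by
    refine ⟨((((loc.toNat : Nat) : Int) - i) % (arr.length : Int)).toNat, ?_⟩
    rw [walk_hits arr.length loc.toNat i hm hj0m hi, List.getElem?_eq_getElem hi, hai]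
  have hhit := Nat.find_spec hex
  have hleast : ∀ e, e < Nat.find hex → arr[walk arr.length loc.toNat e]? ≠ some n :=
    fun e he => Nat.find_min hex he
  have hdm : Nat.find hex < arr.length := by
    have hle : Nat.find hex ≤ ((((loc.toNat : Nat) : Int) - i) % (arr.length : Int)).toNat :=
      Nat.find_min' hex
        (by rw [walk_hits arr.length loc.toNat i hm hj0m hi, List.getElem?_eq_getElem hi, hai])
    have hd0 : 0 ≤ (((loc.toNat : Nat) : Int) - i) % (arr.length : Int) :=
      Int.emod_nonneg _ (by omega)
    have hdlt : (((loc.toNat : Nat) : Int) - i) % (arr.length : Int) < (arr.length : Int) :=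
      Int.emod_lt_of_pos _ (by omega)
    omega
  -- A's walk lands at iI := walk loc.toNat (Nat.find hex) after exactly Nat.find hex steps
  have hA : locl arr loc n
      = ((0 : Int) + ((Nat.find hex : Nat) : Int),
         ((walk arr.length loc.toNat (Nat.find hex) : Nat) : Int)) := by
    unfold locl
    have h := loclGo_spec arr n (Nat.find hex) (2 * arr.length + 2) 0 loc.toNat hj0m (by omega) hhit hleast
    rwa [hloc_cast] at h
  have hiIm : walk arr.length loc.toNat (Nat.find hex) < arr.length :=
    walk_lt arr.length loc.toNat hm hj0m (Nat.find hex)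
  have hwiI := walk_int arr.length loc.toNat hm hj0m (Nat.find hex)
  -- B's minimal candidate is exactly ((Nat.find hex : Int), iI)
  have hmodI : PySem.Int.mod (loc - ((walk arr.length loc.toNat (Nat.find hex) : Nat) : Int))
      ((arr.length : Nat) : Int) = ((Nat.find hex : Nat) : Int) := by
    rw [PySem.Int.mod_eq_emod_of_pos (by omega), hwiI, hloc_cast]
    rw [show loc - (loc - ((Nat.find hex : Nat) : Int)) % ((arr.length : Nat) : Int)
        = loc - (loc - ((Nat.find hex : Nat) : Int)) % ((arr.length : Nat) : Int) from rfl]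
    rw [emod_sub_emod loc ((Nat.find hex : Nat) : Int) ((arr.length : Nat) : Int)]
    exact Int.emod_eq_of_lt (by omega) (by exact_mod_cast hdm)
  have haiI : arr[walk arr.length loc.toNat (Nat.find hex)] = n := by
    have := hhit
    rwa [List.getElem?_eq_getElem hiIm, Option.some_inj] at this
  have hB : locl_alt arr loc n
      = (((Nat.find hex : Nat) : Int),
         ((walk arr.length loc.toNat (Nat.find hex) : Nat) : Int)) := by
    show ((PySem.List.enumerate arr).foldl
      (fun best p =>
        if p.2 = n then
          let d := PySem.Int.mod (loc - p.1) ((arr.length : Nat) : Int)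
          match best with
          | none => some (d, p.1)
          | some b => if d < b.1 then some (d, p.1) else some b
        else best) none).getD (0, 0) = _
    rw [fold_eq_min1 loc n ((arr.length : Nat) : Int) (PySem.List.enumerate arr) none]
    rw [min1_fold_none _ (((Nat.find hex : Nat) : Int),
        ((walk arr.length loc.toNat (Nat.find hex) : Nat) : Int)) ?_ ?_]
    · rfl
    · -- membership: the pair at index iI is a candidate of minimal distance
      rw [List.mem_filterMap]
      refine ⟨(((walk arr.length loc.toNat (Nat.find hex) : Nat) : Int), n), ?_, ?_⟩
      · rw [PySem.List.mem_enumerate_iff]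
        exact ⟨walk arr.length loc.toNat (Nat.find hex), hiIm, by rw [haiI]; simp⟩
      · simp [hmodI]
    · -- minimality
      intro y hy
      rw [List.mem_filterMap] at hy
      obtain ⟨p, hpmem, hpf⟩ := hy
      rw [PySem.List.mem_enumerate_iff] at hpmem
      obtain ⟨k, hk, hpk⟩ := hpmem
      subst hpk
      simp only [zero_add] at hpf
      by_cases hak : arr[k] = n
      · rw [if_pos hak, Option.some_inj] at hpf
        -- y = ((loc - k) % m, k); its distance eN satisfies walk eN = k
        have hmodk : PySem.Int.mod (loc - ((k : Nat) : Int)) ((arr.length : Nat) : Int)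
            = (((loc.toNat : Nat) : Int) - ((k : Nat) : Int)) % ((arr.length : Nat) : Int) := by
          rw [PySem.Int.mod_eq_emod_of_pos (by omega), hloc_cast]
        have hd0 : 0 ≤ (((loc.toNat : Nat) : Int) - ((k : Nat) : Int)) % ((arr.length : Nat) : Int) :=
          Int.emod_nonneg _ (by omega)
        have hdlt : (((loc.toNat : Nat) : Int) - ((k : Nat) : Int)) % ((arr.length : Nat) : Int)
            < ((arr.length : Nat) : Int) := Int.emod_lt_of_pos _ (by omega)
        have hwk := walk_hits arr.length loc.toNat k hm hj0m hk
        have hhitk : arr[walk arr.length loc.toNat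
            (((((loc.toNat : Nat) : Int) - ((k : Nat) : Int)) % ((arr.length : Nat) : Int)).toNat)]? = some n := by
          rw [hwk, List.getElem?_eq_getElem hk, hak]
        have hge : Nat.find hex
            ≤ (((((loc.toNat : Nat) : Int) - ((k : Nat) : Int)) % ((arr.length : Nat) : Int)).toNat) :=
          Nat.find_min' hex hhitk
        rcases Nat.lt_or_ge (Nat.find hex)
            (((((loc.toNat : Nat) : Int) - ((k : Nat) : Int)) % ((arr.length : Nat) : Int)).toNat) with hlt | hge2
        · left
          rw [← hpf, hmodk]
          simp only
          omega
        · right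
          have heq : (((((loc.toNat : Nat) : Int) - ((k : Nat) : Int)) % ((arr.length : Nat) : Int)).toNat)
              = Nat.find hex := by omega
          rw [← hpf, hmodk]
          have hkI : ((k : Nat) : Int) = ((walk arr.length loc.toNat (Nat.find hex) : Nat) : Int) := by
            rw [← heq, hwk]
          rw [Prod.mk.injEq]
          constructor
          · omega
          · exact hkI.symm ▸ rfl
      · rw [if_neg hak] at hpf
        simp at hpf
  rw [hA, hB]
  simp
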